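-- pv_equiv track=rewrite | github.com/4nglp/py | td_4/rle.py | occ
-- ===== SOURCE A (Python) =====
-- def occ(s,sc):
--     l=[]
--     i=0
--     for char in sc:
--         count = 0
--         while i < len(s) and s[i] == char:
--             i+=1
--             count+=1
--         l.append(count)
--     return l
-- ===== SOURCE B (Python) =====
-- def occ(s, sc):
--     # Run-length encode s once, then match sc against the run list with a
--     # shared group pointer (no inner while over s).
--     runs = []
--     pending = None  # (char, count)
--     for ch in s:
--         if pending is not None and pending[0] == ch:
--             pending = (ch, pending[1] + 1)
--         else:
--             if pending is not None:
--                 runs.append(pending)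
--             pending = (ch, 1)
--     if pending is not None:
--         runs.append(pending)
--     out = []
--     g = 0
--     for char in sc:
--         if g < len(runs) and runs[g][0] == char:
--             out.append(runs[g][1])
--             g += 1
--         else:
--             out.append(0)
--     return out
-- ===== Notes on version B (the rewrite author's own statement) =====
-- stated objective: alternative
-- what changed: B first run-length-encodes s in one pass into (char,count) runs, then answers each sc char by comparing it with the current run under a group pointer, replacing A's shared-index inner while loop over s.
import Mathlib
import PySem

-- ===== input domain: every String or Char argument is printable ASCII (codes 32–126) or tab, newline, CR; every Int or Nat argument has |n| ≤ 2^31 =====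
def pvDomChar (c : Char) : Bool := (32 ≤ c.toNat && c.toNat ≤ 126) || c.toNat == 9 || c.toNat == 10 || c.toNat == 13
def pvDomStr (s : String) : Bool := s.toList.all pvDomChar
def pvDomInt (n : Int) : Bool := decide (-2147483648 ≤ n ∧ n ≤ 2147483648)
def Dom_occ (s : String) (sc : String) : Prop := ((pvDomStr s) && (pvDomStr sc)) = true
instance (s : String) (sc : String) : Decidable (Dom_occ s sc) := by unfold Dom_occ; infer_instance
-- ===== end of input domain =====

-- B replaces A's shared-index inner while loop by run-length-encoding s once and then
-- matching sc against the run list with a group pointer; same cost, different decomposition.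

-- ===== PORT A =====
-- the inner `while i < len(s) and s[i] == char: i+=1; count+=1` of Source A
def occWhile (s : List Char) (c : Char) (i count : Nat) : Nat × Nat :=
  if h : i < s.length then
    if s[i] = c then occWhile s c (i + 1) (count + 1) else (i, count)
  else (i, count)
termination_by s.length - i

def occ (s : String) (sc : String) : List Int :=
  (sc.toList.foldl (fun (st : Nat × List Int) char =>
      let r := occWhile s.toList char st.1 0
      (r.1, st.2 ++ [(r.2 : Int)])) (0, ([] : List Int))).2

-- ===== PORT B =====
-- first loop of Source B: build the run list with a pending (char, count)
def occRunsStep (st : List (Char × Nat) × Option (Char × Nat)) (ch : Char) :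
    List (Char × Nat) × Option (Char × Nat) :=
  match st.2 with
  | some (c, n) =>
      if c = ch then (st.1, some (c, n + 1))
      else (st.1 ++ [(c, n)], some (ch, 1))
  | none => (st.1, some (ch, 1))

def occRuns (s : List Char) : List (Char × Nat) :=
  let st := s.foldl occRunsStep ([], none)
  match st.2 with
  | some p => st.1 ++ [p]
  | none => st.1

-- second loop of Source B: group pointer g over the run list
def occ_alt (s : String) (sc : String) : List Int :=
  let runs := occRuns s.toList
  (sc.toList.foldl (fun (st : List Int × Nat) char =>
      match runs[st.2]? with
      | some (c, n) =>
          if c = char then (st.1 ++ [(n : Int)], st.2 + 1) else (st.1 ++ [(0 : Int)], st.2)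
      | none => (st.1 ++ [(0 : Int)], st.2)) (([] : List Int), 0)).1

-- ===== PRECONDITION & SPEC =====
def Spec_occ (s : String) (sc : String) (out : List Int) : Prop := out = occ_alt s sc
instance (s : String) (sc : String) (out : List Int) : Decidable (Spec_occ s sc out) := by unfold Spec_occ; infer_instance

-- ===== CLAIM (what is proved, stated in full; the proofs are below) =====
def Claim_equal_occ : Prop := ∀ (s : String) (sc : String), Dom_occ s sc → Spec_occ s sc (occ s sc)

-- ===== LEMMAS AND PROOFS =====

-- reference semantics shared by both ports: for each sc char, the length of the
-- matching prefix run of the remaining suffix of s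
def goA (t sc : List Char) : List Int :=
  match sc with
  | [] => []
  | c :: rest => ((t.takeWhile (· = c)).length : Int) :: goA (t.dropWhile (· = c)) rest

-- run-length encoding of a char list
def rle (t : List Char) : List (Char × Nat) :=
  match t with
  | [] => []
  | c :: r => (c, (r.takeWhile (· = c)).length + 1) :: rle (r.dropWhile (· = c))
termination_by t.length
decreasing_by
  simp only [List.length_cons]
  exact Nat.lt_succ_of_le (List.length_dropWhile_le _ _)

theorem occWhile_eq (s : List Char) (c : Char) (i count : Nat) :
    occWhile s c i count =
      (i + ((s.drop i).takeWhile (· = c)).length,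
       count + ((s.drop i).takeWhile (· = c)).length) := by
  fun_induction occWhile s c i count with
  | case1 i count h hc ih =>
      rw [ih, ← List.getElem_cons_drop h, List.takeWhile_cons]
      simp only [hc, decide_true, if_true, List.length_cons, Prod.mk.injEq]
      omega
  | case2 i count h hc =>
      rw [← List.getElem_cons_drop h]
      simp [hc]
  | case3 i count h =>
      rw [List.drop_of_length_le (by omega)]
      simp

theorem dropWhile_eq_drop (t : List Char) (p : Char → Bool) :
    t.dropWhile p = t.drop (t.takeWhile p).length := by
  induction t with
  | nil => simp
  | cons a r ih =>
    by_cases h : p a = true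
    · simp [List.dropWhile_cons, List.takeWhile_cons, h, ih]
    · simp [List.dropWhile_cons, List.takeWhile_cons, h]

theorem occ_fold (s : List Char) (sc : List Char) :
    ∀ (i : Nat) (acc : List Int),
      (sc.foldl (fun (st : Nat × List Int) char =>
          let r := occWhile s char st.1 0
          (r.1, st.2 ++ [(r.2 : Int)])) (i, acc)).2 = acc ++ goA (s.drop i) sc := by
  induction sc with
  | nil => simp [goA]
  | cons c rest ih =>
    intro i acc
    simp only [List.foldl_cons]
    rw [ih, occWhile_eq, goA]
    have hd : s.drop (i + ((s.drop i).takeWhile (· = c)).length)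
        = (s.drop i).dropWhile (· = c) := by
      rw [dropWhile_eq_drop, List.drop_drop]
    rw [hd]
    simp

theorem occ_eq_goA (s sc : String) : occ s sc = goA s.toList sc.toList := by
  unfold occ
  rw [occ_fold]
  simp

theorem rle_replicate_append (c : Char) (u : List Char) (hu : ∀ d ∈ u.head?, d ≠ c) :
    ∀ n, 0 < n → rle (List.replicate n c ++ u) = (c, n) :: rle u := by
  have htw : ∀ n, (List.replicate n c ++ u).takeWhile (· = c) = List.replicate n c := by
    intro n
    induction n with
    | zero =>
      cases u with
      | nil => simp
      | cons d r =>
        have := hu d (by simp)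
        simp [this]
    | succ m ih => simp [List.replicate_succ, List.takeWhile_cons, ih]
  have hdw : ∀ n, (List.replicate n c ++ u).dropWhile (· = c) = u.dropWhile (· = c) := by
    intro n
    induction n with
    | zero => simp
    | succ m ih => simp [List.replicate_succ, List.dropWhile_cons, ih]
  intro n hn
  cases n with
  | zero => omega
  | succ m =>
    rw [List.replicate_succ, List.cons_append, rle]
    rw [htw m, hdw m]
    cases u with
    | nil => simp [rle]
    | cons d r =>
      have hd : d ≠ c := hu d (by simp)
      simp [List.dropWhile_cons, hd]

-- the trailing `if pending is not None: runs.append(pending)` of Source B's first loop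
def occRunsFinish (st : List (Char × Nat) × Option (Char × Nat)) : List (Char × Nat) :=
  match st.2 with
  | some p => st.1 ++ [p]
  | none => st.1

theorem occRuns_inv (u : List Char) : ∀ (runs : List (Char × Nat)) (c : Char) (n : Nat), 0 < n →
    occRunsFinish (u.foldl occRunsStep (runs, some (c, n))) =
      runs ++ rle (List.replicate n c ++ u) := by
  induction u with
  | nil =>
    intro runs c n hn
    rw [List.foldl_nil, rle_replicate_append c [] (by simp) n hn]
    simp [occRunsFinish, rle]
  | cons ch rest ih =>
    intro runs c n hn
    simp only [List.foldl_cons, occRunsStep]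
    by_cases h : c = ch
    · subst h
      simp only [if_true]
      rw [ih runs c (n + 1) (by omega)]
      congr 2
      rw [List.replicate_succ']
      simp
    · simp only [if_neg h]
      rw [ih (runs ++ [(c, n)]) ch 1 Nat.one_pos]
      rw [rle_replicate_append c (ch :: rest) (by intro d hd e; simp at hd; exact h (hd ▸ e).symm) n hn]
      simp [List.replicate]

theorem occRuns_eq_rle (s : List Char) : occRuns s = rle s := by
  cases s with
  | nil => simp [occRuns, rle]
  | cons ch r =>
    show occRunsFinish (List.foldl occRunsStep (occRunsStep ([], none) ch) r) = _
    have h1 : occRunsStep ([], none) ch = ([], some (ch, 1)) := rfl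
    rw [h1, occRuns_inv r [] ch 1 Nat.one_pos]
    simp [List.replicate]

-- Source B's second loop, phrased on run lists directly
def go2 (rs : List (Char × Nat)) (sc : List Char) : List Int :=
  match sc with
  | [] => []
  | c :: rest =>
    match rs with
    | [] => 0 :: go2 [] rest
    | (rc, n) :: rtail => if rc = c then (n : Int) :: go2 rtail rest else 0 :: go2 rs rest

theorem go2_rle (sc : List Char) : ∀ t, go2 (rle t) sc = goA t sc := by
  induction sc with
  | nil => intro t; simp [go2, goA]
  | cons c rest ih =>
    intro t
    cases t with
    | nil =>
      have h0 := ih []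
      simp [rle] at h0
      simp [rle, go2, goA, h0]
    | cons a r =>
      by_cases h : a = c
      · subst h
        rw [rle]
        simp [go2, goA, List.takeWhile_cons, List.dropWhile_cons, ih]
      · rw [rle, go2, ← rle, goA]
        simp only [if_neg (by simpa using h)]
        have : (fun x => decide (x = c)) a = false := by simpa using h
        simp [List.takeWhile_cons, List.dropWhile_cons, this, ih]

theorem occ_alt_fold (runs : List (Char × Nat)) (sc : List Char) :
    ∀ (g : Nat) (acc : List Int),
      (sc.foldl (fun (st : List Int × Nat) char =>
          match runs[st.2]? with
          | some (c, n) =>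
              if c = char then (st.1 ++ [(n : Int)], st.2 + 1) else (st.1 ++ [(0 : Int)], st.2)
          | none => (st.1 ++ [(0 : Int)], st.2)) (acc, g)).1
        = acc ++ go2 (runs.drop g) sc := by
  induction sc with
  | nil => simp [go2]
  | cons c rest ih =>
    intro g acc
    simp only [List.foldl_cons]
    cases hrg : runs[g]? with
    | none =>
      have hlen : runs.length ≤ g := by
        simpa using List.getElem?_eq_none_iff.mp hrg
      have hnil : runs.drop g = [] := List.drop_eq_nil_of_le hlen
      simp only []
      rw [ih]
      simp [go2, hnil]
    | some p =>
      obtain ⟨rc, n⟩ := p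
      obtain ⟨hg, hget⟩ := List.getElem?_eq_some_iff.mp hrg
      have hdropg : runs.drop g = (rc, n) :: runs.drop (g + 1) := by
        rw [← List.getElem_cons_drop hg, hget]
      simp only []
      by_cases h : rc = c
      · simp only [if_pos h]
        rw [ih, hdropg, go2]
        simp [h]
      · simp only [if_neg h]
        rw [ih, hdropg, go2]
        simp [h]

theorem occ_alt_eq_goA (s sc : String) : occ_alt s sc = goA s.toList sc.toList := by
  unfold occ_alt
  rw [occ_alt_fold, occRuns_eq_rle]
  simp [go2_rle]

-- ===== VERDICT (by name: the statement is the Claim_ definition above) =====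
theorem occ_spec : Claim_equal_occ := by
  intro s sc _
  unfold Spec_occ
  rw [occ_eq_goA, occ_alt_eq_goA]
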